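-- pv_equiv track=rewrite | github.com/ZJU-REAL/KnowU-Bench | src/knowu_bench/runtime/setup/test_app_clock_setup.py | calculate_day_mask
-- ===== SOURCE A (Python) =====
-- def calculate_day_mask(days: list) -> int:
--     # FIX: Correct mapping to match DeskClock/Setup code (Mon=1)
--     map_ = {
--         "mon": 1, "tue": 2, "wed": 4, "thu": 8, "fri": 16, "sat": 32, "sun": 64
--     }
--     mask = 0
--     for day in days:
--         k = str(day).lower()[:3]
--         if k in map_:
--             mask |= map_[k]
--     return mask
-- ===== SOURCE B (Python) =====
-- def calculate_day_mask(days: list) -> int: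
--     map_ = {
--         "mon": 1, "tue": 2, "wed": 4, "thu": 8, "fri": 16, "sat": 32, "sun": 64
--     }
--     present = {str(day).lower()[:3] for day in days}
--     mask = 0
--     for k, v in map_.items():
--         if k in present:
--             mask |= v
--     return mask
-- ===== Notes on version B (the rewrite author's own statement) =====
-- stated objective: alternative
-- what changed: B first builds a set of normalized day keys from the input, then iterates over the fixed 7-entry table and ORs each bit whose key is present, reversing the traversal (loop over the constant table, membership test against the input-derived set) instead of looping over the input and probing the dict per element.
import Mathlib
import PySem

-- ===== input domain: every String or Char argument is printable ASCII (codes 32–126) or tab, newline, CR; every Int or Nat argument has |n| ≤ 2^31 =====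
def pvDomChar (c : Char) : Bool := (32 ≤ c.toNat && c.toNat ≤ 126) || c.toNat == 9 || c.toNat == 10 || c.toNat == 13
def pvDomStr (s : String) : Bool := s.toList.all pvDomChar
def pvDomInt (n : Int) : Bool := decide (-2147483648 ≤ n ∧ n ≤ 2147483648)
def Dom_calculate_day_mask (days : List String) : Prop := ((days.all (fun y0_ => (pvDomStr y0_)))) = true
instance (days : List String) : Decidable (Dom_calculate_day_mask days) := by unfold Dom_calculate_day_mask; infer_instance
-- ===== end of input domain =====

-- B reverses the traversal: it builds a set of normalized keys from the input once, then ORs the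
-- bits of the fixed 7-entry table whose key is present (objective: alternative; same O(n) cost).

-- ===== PORT A =====
-- str(day).lower()[:3]  (identical expression in both Pythons)
def pvNorm (day : String) : String := PySem.Str.slice (PySem.Str.lower day) none (some 3)

-- the literal map_ dictionary
def pvDayMap : PySem.Dict String Int :=
  PySem.Dict.ofList [("mon", 1), ("tue", 2), ("wed", 4), ("thu", 8), ("fri", 16), ("sat", 32), ("sun", 64)]

-- the body of A's 'for day in days' loop
def pvStepA (mask : Int) (day : String) : Int :=
  match PySem.Dict.get? pvDayMap (pvNorm day) with
  | some v => PySem.Int.bor mask v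
  | none   => mask

def calculate_day_mask (days : List String) : Int :=
  days.foldl pvStepA 0

-- ===== PORT B =====
def calculate_day_mask_alt (days : List String) : Int :=
  let present : PySem.Set String := PySem.Set.ofList (days.map pvNorm)
  (PySem.Dict.items pvDayMap).foldl
    (fun mask kv => if PySem.Set.contains present kv.1 then PySem.Int.bor mask kv.2 else mask) 0

-- ===== PRECONDITION & SPEC =====
def Spec_calculate_day_mask (days : List String) (out : Int) : Prop := out = calculate_day_mask_alt days
instance (days : List String) (out : Int) : Decidable (Spec_calculate_day_mask days out) := by unfold Spec_calculate_day_mask; infer_instance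

-- ===== CLAIM (what is proved, stated in full; the proofs are below) =====
def Claim_equal_calculate_day_mask : Prop := ∀ (days : List String), Dom_calculate_day_mask days → Spec_calculate_day_mask days (calculate_day_mask days)

-- ===== LEMMAS AND PROOFS =====

-- "k is among the normalized keys of days"
def pvHas (days : List String) (k : String) : Bool := decide (k ∈ days.map pvNorm)

-- the mask as a function of the seven presence booleans (table order, over Nat)
def pvG (b1 b2 b3 b4 b5 b6 b7 : Bool) : Nat :=
  let m1 := if b1 then 0 ||| 1 else 0
  let m2 := if b2 then m1 ||| 2 else m1
  let m3 := if b3 then m2 ||| 4 else m2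
  let m4 := if b4 then m3 ||| 8 else m3
  let m5 := if b5 then m4 ||| 16 else m4
  let m6 := if b6 then m5 ||| 32 else m5
  if b7 then m6 ||| 64 else m6

lemma pvHas_cons (d : String) (ds : List String) (k : String) :
    pvHas (d :: ds) k = (decide (k = pvNorm d) || pvHas ds k) := by
  simp [pvHas]

lemma pvG_mon : ∀ b1 b2 b3 b4 b5 b6 b7, 1 ||| pvG b1 b2 b3 b4 b5 b6 b7 = pvG true b2 b3 b4 b5 b6 b7 := by decide
lemma pvG_tue : ∀ b1 b2 b3 b4 b5 b6 b7, 2 ||| pvG b1 b2 b3 b4 b5 b6 b7 = pvG b1 true b3 b4 b5 b6 b7 := by decide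
lemma pvG_wed : ∀ b1 b2 b3 b4 b5 b6 b7, 4 ||| pvG b1 b2 b3 b4 b5 b6 b7 = pvG b1 b2 true b4 b5 b6 b7 := by decide
lemma pvG_thu : ∀ b1 b2 b3 b4 b5 b6 b7, 8 ||| pvG b1 b2 b3 b4 b5 b6 b7 = pvG b1 b2 b3 true b5 b6 b7 := by decide
lemma pvG_fri : ∀ b1 b2 b3 b4 b5 b6 b7, 16 ||| pvG b1 b2 b3 b4 b5 b6 b7 = pvG b1 b2 b3 b4 true b6 b7 := by decide
lemma pvG_sat : ∀ b1 b2 b3 b4 b5 b6 b7, 32 ||| pvG b1 b2 b3 b4 b5 b6 b7 = pvG b1 b2 b3 b4 b5 true b7 := by decide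
lemma pvG_sun : ∀ b1 b2 b3 b4 b5 b6 b7, 64 ||| pvG b1 b2 b3 b4 b5 b6 b7 = pvG b1 b2 b3 b4 b5 b6 true := by decide

lemma pvStepA_eq (m : Nat) (d : String) (v : Nat) (h : PySem.Dict.get? pvDayMap (pvNorm d) = some (v : Int)) :
    pvStepA (m : Int) d = ((m ||| v : Nat) : Int) := by
  simp [pvStepA, h, ← PySem.Int.bor_natCast]

lemma pvItems : PySem.Dict.items pvDayMap =
    [("mon", (1:Int)), ("tue", 2), ("wed", 4), ("thu", 8), ("fri", 16), ("sat", 32), ("sun", 64)] := by decide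

lemma pvGet_none (d : String) (h1 : ¬ pvNorm d = "mon") (h2 : ¬ pvNorm d = "tue")
    (h3 : ¬ pvNorm d = "wed") (h4 : ¬ pvNorm d = "thu") (h5 : ¬ pvNorm d = "fri")
    (h6 : ¬ pvNorm d = "sat") (h7 : ¬ pvNorm d = "sun") :
    PySem.Dict.get? pvDayMap (pvNorm d) = none := by
  simp only [PySem.Dict.get?]
  rw [pvItems]
  have e1 : ("mon" == pvNorm d) = false := beq_eq_false_iff_ne.mpr (fun e => h1 e.symm)
  have e2 : ("tue" == pvNorm d) = false := beq_eq_false_iff_ne.mpr (fun e => h2 e.symm)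
  have e3 : ("wed" == pvNorm d) = false := beq_eq_false_iff_ne.mpr (fun e => h3 e.symm)
  have e4 : ("thu" == pvNorm d) = false := beq_eq_false_iff_ne.mpr (fun e => h4 e.symm)
  have e5 : ("fri" == pvNorm d) = false := beq_eq_false_iff_ne.mpr (fun e => h5 e.symm)
  have e6 : ("sat" == pvNorm d) = false := beq_eq_false_iff_ne.mpr (fun e => h6 e.symm)
  have e7 : ("sun" == pvNorm d) = false := beq_eq_false_iff_ne.mpr (fun e => h7 e.symm)
  simp [List.find?, e1, e2, e3, e4, e5, e6, e7]

lemma alt_eq (days : List String) :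
    calculate_day_mask_alt days =
      ((pvG (pvHas days "mon") (pvHas days "tue") (pvHas days "wed") (pvHas days "thu")
            (pvHas days "fri") (pvHas days "sat") (pvHas days "sun") : Nat) : Int) := by
  unfold calculate_day_mask_alt
  rw [pvItems]
  have hc : ∀ k : String, PySem.Set.contains (PySem.Set.ofList (days.map pvNorm)) k = pvHas days k := by
    intro k; simp [PySem.Set.contains, PySem.Set.mem_ofList, pvHas]
  simp only [List.foldl_cons, List.foldl_nil, hc]
  generalize pvHas days "mon" = b1
  generalize pvHas days "tue" = b2
  generalize pvHas days "wed" = b3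
  generalize pvHas days "thu" = b4
  generalize pvHas days "fri" = b5
  generalize pvHas days "sat" = b6
  generalize pvHas days "sun" = b7
  cases b1 <;> cases b2 <;> cases b3 <;> cases b4 <;> cases b5 <;> cases b6 <;> cases b7 <;> decide

lemma foldA_eq (days : List String) : ∀ (m : Nat),
    days.foldl pvStepA (m : Int) =
      PySem.Int.bor (m : Int)
        ((pvG (pvHas days "mon") (pvHas days "tue") (pvHas days "wed") (pvHas days "thu")
              (pvHas days "fri") (pvHas days "sat") (pvHas days "sun") : Nat) : Int) := by
  induction days with
  | nil =>
    intro m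
    simp [pvHas, pvG]
  | cons d ds ih =>
    intro m
    rw [List.foldl_cons]
    by_cases h1 : pvNorm d = "mon"
    · rw [pvStepA_eq m d 1 (by rw [h1]; decide), ih (m ||| 1)]
      simp [pvHas_cons, h1]
      rw [Nat.lor_assoc, pvG_mon]
    · by_cases h2 : pvNorm d = "tue"
      · rw [pvStepA_eq m d 2 (by rw [h2]; decide), ih (m ||| 2)]
        simp [pvHas_cons, h2]
        rw [Nat.lor_assoc, pvG_tue]
      · by_cases h3 : pvNorm d = "wed"
        · rw [pvStepA_eq m d 4 (by rw [h3]; decide), ih (m ||| 4)]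
          simp [pvHas_cons, h3]
          rw [Nat.lor_assoc, pvG_wed]
        · by_cases h4 : pvNorm d = "thu"
          · rw [pvStepA_eq m d 8 (by rw [h4]; decide), ih (m ||| 8)]
            simp [pvHas_cons, h4]
            rw [Nat.lor_assoc, pvG_thu]
          · by_cases h5 : pvNorm d = "fri"
            · rw [pvStepA_eq m d 16 (by rw [h5]; decide), ih (m ||| 16)]
              simp [pvHas_cons, h5]
              rw [Nat.lor_assoc, pvG_fri]
            · by_cases h6 : pvNorm d = "sat"
              · rw [pvStepA_eq m d 32 (by rw [h6]; decide), ih (m ||| 32)]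
                simp [pvHas_cons, h6]
                rw [Nat.lor_assoc, pvG_sat]
              · by_cases h7 : pvNorm d = "sun"
                · rw [pvStepA_eq m d 64 (by rw [h7]; decide), ih (m ||| 64)]
                  simp [pvHas_cons, h7]
                  rw [Nat.lor_assoc, pvG_sun]
                · have hstep : pvStepA (m : Int) d = (m : Int) := by
                    simp [pvStepA, pvGet_none d h1 h2 h3 h4 h5 h6 h7]
                  rw [hstep, ih m]
                  have f1 : decide ("mon" = pvNorm d) = false := decide_eq_false (fun e => h1 e.symm)
                  have f2 : decide ("tue" = pvNorm d) = false := decide_eq_false (fun e => h2 e.symm)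
                  have f3 : decide ("wed" = pvNorm d) = false := decide_eq_false (fun e => h3 e.symm)
                  have f4 : decide ("thu" = pvNorm d) = false := decide_eq_false (fun e => h4 e.symm)
                  have f5 : decide ("fri" = pvNorm d) = false := decide_eq_false (fun e => h5 e.symm)
                  have f6 : decide ("sat" = pvNorm d) = false := decide_eq_false (fun e => h6 e.symm)
                  have f7 : decide ("sun" = pvNorm d) = false := decide_eq_false (fun e => h7 e.symm)
                  simp only [pvHas_cons, f1, f2, f3, f4, f5, f6, f7, Bool.false_or]

-- ===== VERDICT (by name: the statement is the Claim_ definition above) =====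
theorem calculate_day_mask_spec : Claim_equal_calculate_day_mask := by
  intro days _
  unfold Spec_calculate_day_mask
  rw [alt_eq days]
  have h := foldA_eq days 0
  rw [PySem.Int.bor_comm] at h
  simp only [Nat.cast_zero, PySem.Int.bor_zero] at h
  simpa [calculate_day_mask] using h
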